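-- pv_equiv track=rewrite | github.com/ksanghi/aiccounting | core/migration/cloud_csv.py | _pick_header
-- ===== SOURCE A (Python) =====
-- from typing import Optional
--
-- def _norm(s) -> str:
--     return str(s or "").strip().lower()
--
-- def _pick_header(headers, options) -> Optional[int]:
--     norm = [_norm(h) for h in headers]
--     for o in options:
--         if o in norm:
--             return norm.index(o)
--     for o in options:
--         for i, h in enumerate(norm):
--             if o in h:
--                 return i
--     return None
-- ===== SOURCE B (Python) =====
-- def _norm(s) -> str:
--     return str(s or "").strip().lower()
--
-- def _pick_header(headers, options):
--     norm = [_norm(h) for h in headers]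
--     sub = None
--     for o in options:
--         if o in norm:
--             return norm.index(o)
--         if sub is None:
--             for i, h in enumerate(norm):
--                 if o in h:
--                     sub = i
--                     break
--     return sub
-- ===== Notes on version B (the rewrite author's own statement) =====
-- stated objective: simpler
-- what changed: B replaces A's two sequential passes over options (exact-match pass, then substring pass with a full rescan) by a single pass that returns on the first exact match and stashes the first substring candidate for use only if no exact match exists.
import Mathlib
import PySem

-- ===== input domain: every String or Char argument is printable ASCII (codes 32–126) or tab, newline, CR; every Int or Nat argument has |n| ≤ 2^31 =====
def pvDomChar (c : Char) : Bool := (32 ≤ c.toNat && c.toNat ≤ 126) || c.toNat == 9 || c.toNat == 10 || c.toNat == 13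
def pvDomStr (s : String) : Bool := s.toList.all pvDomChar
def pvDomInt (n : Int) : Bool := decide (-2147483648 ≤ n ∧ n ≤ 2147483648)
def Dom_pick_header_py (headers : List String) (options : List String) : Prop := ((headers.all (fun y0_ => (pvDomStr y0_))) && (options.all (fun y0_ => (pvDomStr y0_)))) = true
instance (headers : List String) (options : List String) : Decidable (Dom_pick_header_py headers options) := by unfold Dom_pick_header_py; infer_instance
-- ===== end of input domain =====

-- B fuses A's two sequential loops into one pass over options that records the first
-- substring candidate while still returning the first exact match (objective: simpler, one pass).

-- ===== PORT A =====

-- _norm(h) = str(h or "").strip().lower()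
def pvNormA (h : String) : String :=
  PySem.Str.lower (PySem.Str.strip (if h == "" then "" else h))

-- first loop: for o in options: if o in norm: return norm.index(o)
def pvExactLoopA (norm : List String) : List String → Option Int
  | [] => none
  | o :: os =>
    if o ∈ norm then (PySem.List.index? norm o).map (fun n => (n : Int))
    else pvExactLoopA norm os

-- inner loop of the second loop: for i, h in enumerate(norm): if o in h: return i
def pvSubScanA (norm : List String) (o : String) : Option Int :=
  (PySem.List.enumerate norm 0).findSome? (fun p => if PySem.Str.isIn o p.2 then some p.1 else none)

-- second loop: for o in options: (inner scan)
def pvSubLoopA (norm : List String) : List String → Option Int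
  | [] => none
  | o :: os =>
    match pvSubScanA norm o with
    | some i => some i
    | none => pvSubLoopA norm os

def pick_header_py (headers : List String) (options : List String) : Option Int :=
  let norm := headers.map pvNormA
  match pvExactLoopA norm options with
  | some i => some i
  | none => pvSubLoopA norm options

-- ===== PORT B =====

def pvNormB (h : String) : String :=
  PySem.Str.lower (PySem.Str.strip (if h == "" then "" else h))

-- inner scan with break: first i with o in norm[i]
def pvSubScanB (norm : List String) (o : String) : Option Int :=
  (PySem.List.enumerate norm 0).findSome? (fun p => if PySem.Str.isIn o p.2 then some p.1 else none)

-- single pass: exact match returns at once, else stash the first substring candidate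
def pvGoB (norm : List String) : List String → Option Int → Option Int
  | [], sub => sub
  | o :: os, sub =>
    if o ∈ norm then (PySem.List.index? norm o).map (fun n => (n : Int))
    else pvGoB norm os (match sub with | some j => some j | none => pvSubScanB norm o)

def pick_header_py_alt (headers : List String) (options : List String) : Option Int :=
  let norm := headers.map pvNormB
  pvGoB norm options none

-- ===== PRECONDITION & SPEC =====
def Spec_pick_header_py (headers : List String) (options : List String) (out : Option Int) : Prop := out = pick_header_py_alt headers options
instance (headers : List String) (options : List String) (out : Option Int) : Decidable (Spec_pick_header_py headers options out) := by unfold Spec_pick_header_py; infer_instance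

-- ===== CLAIM (what is proved, stated in full; the proofs are below) =====
def Claim_equal_pick_header_py : Prop := ∀ (headers : List String) (options : List String), Dom_pick_header_py headers options → Spec_pick_header_py headers options (pick_header_py headers options)

-- ===== LEMMAS AND PROOFS =====

theorem pvGoB_some (norm : List String) (os : List String) (j : Int) :
    pvGoB norm os (some j) =
      match pvExactLoopA norm os with
      | some i => some i
      | none => some j := by
  induction os with
  | nil => rfl
  | cons o os ih =>
    simp only [pvGoB, pvExactLoopA]
    split_ifs with h
    · rw [PySem.List.index?_eq_idxOf?]
      cases hk : List.idxOf? o norm with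
      | none => simp_all [List.idxOf?_eq_none_iff]
      | some k => rfl
    · exact ih

theorem pvGoB_none (norm : List String) (os : List String) :
    pvGoB norm os none =
      match pvExactLoopA norm os with
      | some i => some i
      | none => pvSubLoopA norm os := by
  induction os with
  | nil => rfl
  | cons o os ih =>
    simp only [pvGoB, pvExactLoopA, pvSubLoopA]
    split_ifs with h
    · rw [PySem.List.index?_eq_idxOf?]
      cases hk : List.idxOf? o norm with
      | none => simp_all [List.idxOf?_eq_none_iff]
      | some k => rfl
    · cases hs : pvSubScanB norm o with
      | some j =>
        have : pvSubScanA norm o = some j := hs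
        rw [this, pvGoB_some]
      | none =>
        have : pvSubScanA norm o = none := hs
        rw [this, ih]

-- ===== VERDICT (by name: the statement is the Claim_ definition above) =====
theorem pick_header_py_spec : Claim_equal_pick_header_py := by
  intro headers options _
  unfold Spec_pick_header_py pick_header_py pick_header_py_alt
  have hnorm : headers.map pvNormB = headers.map pvNormA := rfl
  rw [hnorm, pvGoB_none]
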